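-- pv_equiv track=rewrite | github.com/deba12-tech/Apna-Saathi | recommendation_engine.py | is_nearby_location
-- ===== SOURCE A (Python) =====
-- def is_nearby_location(supplier_location, vendor_location):
--     """Check if supplier is in a nearby location"""
--     nearby_mappings = {
--         'mumbai': ['thane', 'navi mumbai', 'kalyan'],
--         'delhi': ['noida', 'gurgaon', 'ghaziabad'],
--         'bangalore': ['mysore', 'mandya', 'tumkur'],
--         'siliguri': ['darjeeling', 'jalpaiguri', 'cooch behar', 'alipurduar'],
--         'darjeeling': ['siliguri', 'jalpaiguri', 'kurseong', 'kalimpong'],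
--         'jalpaiguri': ['siliguri', 'cooch behar', 'alipurduar', 'darjeeling'],
--         'cooch behar': ['jalpaiguri', 'alipurduar', 'siliguri']
--     }
--
--     vendor_loc = vendor_location.lower()
--     supplier_loc = supplier_location.lower()
--
--     for city, nearby in nearby_mappings.items():
--         if vendor_loc == city and supplier_loc in nearby:
--             return True
--         if supplier_loc == city and vendor_loc in nearby:
--             return True
--
--     return False
-- ===== SOURCE B (Python) =====
-- def is_nearby_location(supplier_location, vendor_location):
--     """Check if supplier is in a nearby location"""
--     nearby_mappings = {
--         'mumbai': ['thane', 'navi mumbai', 'kalyan'],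
--         'delhi': ['noida', 'gurgaon', 'ghaziabad'],
--         'bangalore': ['mysore', 'mandya', 'tumkur'],
--         'siliguri': ['darjeeling', 'jalpaiguri', 'cooch behar', 'alipurduar'],
--         'darjeeling': ['siliguri', 'jalpaiguri', 'kurseong', 'kalimpong'],
--         'jalpaiguri': ['siliguri', 'cooch behar', 'alipurduar', 'darjeeling'],
--         'cooch behar': ['jalpaiguri', 'alipurduar', 'siliguri']
--     }
--
--     vendor_loc = vendor_location.lower()
--     supplier_loc = supplier_location.lower()
--
--     # Flatten the adjacency mapping into its symmetric edge set, then do one membership test.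
--     edges = set()
--     for city, nearby in nearby_mappings.items():
--         for n in nearby:
--             edges.add((city, n))
--             edges.add((n, city))
--     return (vendor_loc, supplier_loc) in edges
-- ===== Notes on version B (the rewrite author's own statement) =====
-- stated objective: alternative
-- what changed: Instead of scanning the adjacency dict with two directional equality/membership checks per entry, B flattens the mapping once into its symmetric edge set and answers with a single membership test of the (vendor, supplier) pair.
import Mathlib
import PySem

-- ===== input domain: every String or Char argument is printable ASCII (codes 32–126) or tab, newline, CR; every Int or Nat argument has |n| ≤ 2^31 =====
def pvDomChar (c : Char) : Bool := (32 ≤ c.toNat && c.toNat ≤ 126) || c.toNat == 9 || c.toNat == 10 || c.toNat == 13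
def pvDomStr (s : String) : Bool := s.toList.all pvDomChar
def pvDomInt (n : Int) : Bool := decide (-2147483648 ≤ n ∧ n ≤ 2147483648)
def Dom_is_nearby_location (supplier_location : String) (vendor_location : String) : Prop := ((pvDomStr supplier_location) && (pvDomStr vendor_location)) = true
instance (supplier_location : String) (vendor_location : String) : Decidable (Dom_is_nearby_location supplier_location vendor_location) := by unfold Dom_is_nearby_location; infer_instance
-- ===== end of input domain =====

-- ===== PORT A =====
-- B flattens the adjacency dict into its symmetric edge set and answers with ONE membership
-- test of the ordered pair, instead of A's scan with two directional checks per entry (alternative; return value only).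

-- shared literal data of both programs
def pvNearbyPairs : List (String × List String) :=
  [("mumbai", ["thane", "navi mumbai", "kalyan"]),
   ("delhi", ["noida", "gurgaon", "ghaziabad"]),
   ("bangalore", ["mysore", "mandya", "tumkur"]),
   ("siliguri", ["darjeeling", "jalpaiguri", "cooch behar", "alipurduar"]),
   ("darjeeling", ["siliguri", "jalpaiguri", "kurseong", "kalimpong"]),
   ("jalpaiguri", ["siliguri", "cooch behar", "alipurduar", "darjeeling"]),
   ("cooch behar", ["jalpaiguri", "alipurduar", "siliguri"])]

-- A's for-loop over nearby_mappings.items() with its two early returns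
def pvLoopA (vendor_loc supplier_loc : String) : List (String × List String) → Bool
  | [] => false
  | (city, nearby) :: rest =>
    if vendor_loc == city && nearby.contains supplier_loc then true
    else if supplier_loc == city && nearby.contains vendor_loc then true
    else pvLoopA vendor_loc supplier_loc rest

def is_nearby_location (supplier_location : String) (vendor_location : String) : Bool :=
  let vendor_loc := PySem.Str.lower vendor_location
  let supplier_loc := PySem.Str.lower supplier_location
  pvLoopA vendor_loc supplier_loc pvNearbyPairs

-- ===== PORT B =====
-- Source B's nested loop building the symmetric edge set ('edges.add((city, n)); edges.add((n, city))')
def pvAddEdges (acc : PySem.Set (String × String)) : List (String × List String) → PySem.Set (String × String)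
  | [] => acc
  | (city, nearby) :: rest =>
    pvAddEdges (nearby.foldl (fun s n => PySem.Set.add (PySem.Set.add s (city, n)) (n, city)) acc) rest

def is_nearby_location_alt (supplier_location : String) (vendor_location : String) : Bool :=
  let vendor_loc := PySem.Str.lower vendor_location
  let supplier_loc := PySem.Str.lower supplier_location
  let edges := pvAddEdges PySem.Set.empty pvNearbyPairs
  PySem.Set.contains edges (vendor_loc, supplier_loc)

-- ===== PRECONDITION & SPEC =====
def Spec_is_nearby_location (supplier_location : String) (vendor_location : String) (out : Bool) : Prop := out = is_nearby_location_alt supplier_location vendor_location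
instance (supplier_location : String) (vendor_location : String) (out : Bool) : Decidable (Spec_is_nearby_location supplier_location vendor_location out) := by unfold Spec_is_nearby_location; infer_instance

-- ===== CLAIM (what is proved, stated in full; the proofs are below) =====
def Claim_equal_is_nearby_location : Prop := ∀ (supplier_location : String) (vendor_location : String), Dom_is_nearby_location supplier_location vendor_location → Spec_is_nearby_location supplier_location vendor_location (is_nearby_location supplier_location vendor_location)

-- ===== LEMMAS AND PROOFS =====
theorem pvMem_inner_fold (nb : List String) (city : String) (acc : PySem.Set (String × String))
    (x : String × String) :
    x ∈ nb.foldl (fun s n => PySem.Set.add (PySem.Set.add s (city, n)) (n, city)) acc ↔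
      x ∈ acc ∨ ∃ n ∈ nb, x = (city, n) ∨ x = (n, city) := by
  induction nb generalizing acc with
  | nil => simp
  | cons n rest ih =>
    simp only [List.foldl_cons, ih, PySem.Set.mem_add, List.mem_cons]
    aesop

theorem pvMem_addEdges (l : List (String × List String)) (acc : PySem.Set (String × String))
    (x : String × String) :
    x ∈ pvAddEdges acc l ↔
      x ∈ acc ∨ ∃ p ∈ l, ∃ n ∈ p.2, x = (p.1, n) ∨ x = (n, p.1) := by
  induction l generalizing acc with
  | nil => simp [pvAddEdges]
  | cons p rest ih =>
    obtain ⟨city, nb⟩ := p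
    rw [pvAddEdges, ih, pvMem_inner_fold]
    simp only [List.mem_cons]
    aesop

theorem pvContains_iff (v s : String) (l : List (String × List String)) :
    PySem.Set.contains (pvAddEdges PySem.Set.empty l) (v, s) = true ↔
      ∃ p ∈ l, (v = p.1 ∧ s ∈ p.2) ∨ (s = p.1 ∧ v ∈ p.2) := by
  have : PySem.Set.contains (pvAddEdges PySem.Set.empty l) (v, s) = true ↔
      (v, s) ∈ pvAddEdges PySem.Set.empty l := by
    simp [PySem.Set.contains]
  rw [this, pvMem_addEdges]
  simp only [PySem.Set.empty, List.not_mem_nil, false_or]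
  constructor
  · rintro ⟨p, hp, n, hn, h | h⟩
    · injection h with h1 h2; exact ⟨p, hp, Or.inl ⟨h1, h2 ▸ hn⟩⟩
    · injection h with h1 h2; exact ⟨p, hp, Or.inr ⟨h2, h1 ▸ hn⟩⟩
  · rintro ⟨p, hp, ⟨hv, hn⟩ | ⟨hs, hn⟩⟩
    · exact ⟨p, hp, s, hn, Or.inl (by rw [hv])⟩
    · exact ⟨p, hp, v, hn, Or.inr (by rw [hs])⟩

theorem pvLoopA_iff (v s : String) (l : List (String × List String)) :
    pvLoopA v s l = true ↔ ∃ p ∈ l, (v = p.1 ∧ s ∈ p.2) ∨ (s = p.1 ∧ v ∈ p.2) := by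
  induction l with
  | nil => simp [pvLoopA]
  | cons p rest ih =>
    obtain ⟨city, nb⟩ := p
    rw [pvLoopA]
    split_ifs with h1 h2
    · simp only [beq_iff_eq, Bool.and_eq_true, List.contains_iff_mem] at h1
      simp only [List.mem_cons, true_iff]
      exact ⟨(city, nb), Or.inl rfl, Or.inl ⟨h1.1, h1.2⟩⟩
    · simp only [beq_iff_eq, Bool.and_eq_true, List.contains_iff_mem] at h2
      simp only [List.mem_cons, true_iff]
      exact ⟨(city, nb), Or.inl rfl, Or.inr ⟨h2.1, h2.2⟩⟩
    · simp only [beq_iff_eq, Bool.and_eq_true, List.contains_iff_mem, not_and_or] at h1 h2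
      rw [ih]
      simp only [List.mem_cons]
      aesop

-- ===== VERDICT (by name: the statement is the Claim_ definition above) =====
theorem is_nearby_location_spec : Claim_equal_is_nearby_location := by
  intro supplier_location vendor_location _
  unfold Spec_is_nearby_location is_nearby_location is_nearby_location_alt
  apply Bool.eq_iff_iff.mpr
  rw [pvLoopA_iff, pvContains_iff]
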